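-- pv_equiv track=rewrite | github.com/0x585/AgentWorkflowKit | .workflow-kit/branch_name_policy.py | _truncate_suffix
-- ===== SOURCE A (Python) =====
-- MAX_SUFFIX_LENGTH = 40
--
-- def _truncate_suffix(suffix: str) -> str:
--     parts = [part for part in suffix.split("-") if part]
--     while len(parts) > 1 and len("-".join(parts)) > MAX_SUFFIX_LENGTH:
--         parts.pop()
--
--     truncated = "-".join(parts)
--     if len(truncated) > MAX_SUFFIX_LENGTH:
--         truncated = truncated[:MAX_SUFFIX_LENGTH].rstrip("-")
--     return truncated
-- ===== SOURCE B (Python) =====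
-- MAX_SUFFIX_LENGTH = 40
--
-- def _truncate_suffix(suffix: str) -> str:
--     parts = [part for part in suffix.split("-") if part]
--     if not parts:
--         return ""
--     keep = 1
--     total = len(parts[0])
--     for part in parts[1:]:
--         total += 1 + len(part)
--         if total > MAX_SUFFIX_LENGTH:
--             break
--         keep += 1
--     return "-".join(parts[:keep])[:MAX_SUFFIX_LENGTH]
-- ===== Notes on version B (the rewrite author's own statement) =====
-- stated objective: faster
-- what changed: Replaces the while-loop that pops the last part and re-joins the whole list each iteration (quadratic) by one forward pass accumulating the joined length to find how many parts fit in 40 chars, then a single join and slice.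
import Mathlib
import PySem

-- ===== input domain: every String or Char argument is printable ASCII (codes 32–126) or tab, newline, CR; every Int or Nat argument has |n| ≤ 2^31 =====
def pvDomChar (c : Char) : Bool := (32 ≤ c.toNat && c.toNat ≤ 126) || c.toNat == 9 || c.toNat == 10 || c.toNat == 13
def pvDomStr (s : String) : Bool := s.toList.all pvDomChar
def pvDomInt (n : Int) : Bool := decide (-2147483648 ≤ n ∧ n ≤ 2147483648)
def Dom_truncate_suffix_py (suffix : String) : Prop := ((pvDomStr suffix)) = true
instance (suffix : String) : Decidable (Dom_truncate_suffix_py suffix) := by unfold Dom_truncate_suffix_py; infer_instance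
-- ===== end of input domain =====

-- B replaces A's quadratic pop-and-rejoin while-loop by a single forward pass that
-- accumulates the joined length and keeps the maximal prefix of parts, joining once.

-- ===== PORT A =====
-- 's.rstrip("-")' ported by hand (no PySem rstrip-with-chars): drop trailing '-' chars; exact.
def pvRstripDash (cs : List Char) : List Char :=
  (cs.reverse.dropWhile (fun c => c == '-')).reverse

-- the 'while len(parts) > 1 and len("-".join(parts)) > 40: parts.pop()' loop
def pvWhilePop (parts : List (List Char)) : List (List Char) :=
  if parts.length > 1 ∧ (PySem.Chars.join ['-'] parts).length > 40 then
    pvWhilePop parts.dropLast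
  else parts
termination_by parts.length
decreasing_by
  rename_i h
  simp [List.length_dropLast]
  omega

-- 'suffix.split("-")' with the non-empty literal separator is PySem.Chars.splitOn (exact)
def truncate_suffix_py (suffix : String) : String :=
  let parts := (PySem.Chars.splitOn suffix.toList ['-']).filter (fun p => p ≠ [])
  let parts2 := pvWhilePop parts
  let truncated := PySem.Chars.join ['-'] parts2
  let truncated2 := if truncated.length > 40 then pvRstripDash (truncated.take 40) else truncated
  String.ofList truncated2

-- ===== PORT B =====
-- the forward pass of Source B: running total of the joined length, count of parts kept
def pvKeep (total : Nat) (keep : Nat) : List (List Char) → Nat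
  | [] => keep
  | p :: ps => if total + 1 + p.length > 40 then keep else pvKeep (total + 1 + p.length) (keep + 1) ps

def truncate_suffix_py_alt (suffix : String) : String :=
  let parts := (PySem.Chars.splitOn suffix.toList ['-']).filter (fun p => p ≠ [])
  match parts with
  | [] => ""
  | p0 :: rest =>
    let keep := pvKeep p0.length 1 rest
    String.ofList ((PySem.Chars.join ['-'] ((p0 :: rest).take keep)).take 40)

-- ===== PRECONDITION & SPEC =====
def Spec_truncate_suffix_py (suffix : String) (out : String) : Prop := out = truncate_suffix_py_alt suffix
instance (suffix : String) (out : String) : Decidable (Spec_truncate_suffix_py suffix out) := by unfold Spec_truncate_suffix_py; infer_instance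

-- ===== CLAIM (what is proved, stated in full; the proofs are below) =====
def Claim_equal_truncate_suffix_py : Prop := ∀ (suffix : String), Dom_truncate_suffix_py suffix → Spec_truncate_suffix_py suffix (truncate_suffix_py suffix)

-- ===== LEMMAS AND PROOFS =====

-- joined length bookkeeping: cost of appending each part after the first
def pvCosts (ps : List (List Char)) : Nat := (ps.map (fun p => p.length + 1)).sum

theorem pvCosts_cons (p : List Char) (ps : List (List Char)) :
    pvCosts (p :: ps) = p.length + 1 + pvCosts ps := by
  simp [pvCosts]

theorem pvJoinLen (p : List Char) (ps : List (List Char)) :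
    (PySem.Chars.join ['-'] (p :: ps)).length = p.length + pvCosts ps := by
  induction ps generalizing p with
  | nil => simp [PySem.Chars.join_singleton, pvCosts]
  | cons q ps ih =>
    rw [PySem.Chars.join_cons_cons]
    simp only [List.length_append, ih q, pvCosts_cons]
    simp; omega

theorem pvKeep_ge (ps : List (List Char)) (t k : Nat) : k ≤ pvKeep t k ps := by
  induction ps generalizing t k with
  | nil => simp [pvKeep]
  | cons p ps ih =>
    simp only [pvKeep]
    split
    · exact le_refl _
    · exact le_trans (Nat.le_succ k) (ih _ _)

theorem pvKeep_le (ps : List (List Char)) (t k : Nat) : pvKeep t k ps ≤ k + ps.length := by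
  induction ps generalizing t k with
  | nil => simp [pvKeep]
  | cons p ps ih =>
    simp only [pvKeep]
    split
    · simp
    · have := ih (t + 1 + p.length) (k + 1)
      simp only [List.length_cons]; omega

theorem pvKeep_all (ps : List (List Char)) (t k : Nat) (h : t + pvCosts ps ≤ 40) :
    pvKeep t k ps = k + ps.length := by
  induction ps generalizing t k with
  | nil => simp [pvKeep]
  | cons p ps ih =>
    rw [pvCosts_cons] at h
    simp only [pvKeep]
    rw [if_neg (by omega)]
    rw [ih (t + 1 + p.length) (k + 1) (by omega)]
    simp; omega

theorem pvKeep_stop (ps : List (List Char)) (q : List Char) (t k : Nat)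
    (h : 40 < t + pvCosts (ps ++ [q])) :
    pvKeep t k (ps ++ [q]) = pvKeep t k ps := by
  induction ps generalizing t k with
  | nil =>
    simp only [List.nil_append, pvCosts] at h
    simp only [List.nil_append, pvKeep]
    rw [if_pos (by simp at h; omega)]
  | cons p ps ih =>
    simp only [List.cons_append, pvCosts_cons] at h
    simp only [List.cons_append, pvKeep]
    split
    · rfl
    · exact ih _ _ (by omega)

theorem pvKeep_ok (ps : List (List Char)) (t k : Nat) :
    pvKeep t k ps = k ∨ t + pvCosts (ps.take (pvKeep t k ps - k)) ≤ 40 := by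
  induction ps generalizing t k with
  | nil => left; rfl
  | cons p ps ih =>
    simp only [pvKeep]
    split
    · left; rfl
    · rename_i hle
      right
      rcases ih (t + 1 + p.length) (k + 1) with h | h
      · rw [h]
        have h1 : k + 1 - k = 1 := by omega
        rw [h1]
        simp [pvCosts]
        omega
      · have hge := pvKeep_ge ps (t + 1 + p.length) (k + 1)
        set K := pvKeep (t + 1 + p.length) (k + 1) ps with hK
        have h1 : K - k = (K - (k + 1)) + 1 := by omega
        rw [h1, List.take_succ_cons, pvCosts_cons]
        omega

-- A's pop loop computes exactly B's maximal prefix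
theorem pvLoop_eq_take (rest : List (List Char)) (p0 : List Char) :
    pvWhilePop (p0 :: rest) = (p0 :: rest).take (pvKeep p0.length 1 rest) := by
  induction rest using List.reverseRecOn with
  | nil =>
    rw [pvWhilePop]
    rw [if_neg (by simp)]
    simp [pvKeep]
  | append_singleton rs q ih =>
    by_cases hL : p0.length + pvCosts (rs ++ [q]) ≤ 40
    · rw [pvWhilePop]
      rw [if_neg (by rw [pvJoinLen]; omega)]
      rw [pvKeep_all _ _ _ hL]
      simp
    · rw [pvWhilePop]
      rw [if_pos (And.intro (by simp) (by rw [pvJoinLen]; omega))]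
      have hcons : p0 :: (rs ++ [q]) = (p0 :: rs) ++ [q] := by simp
      rw [hcons, List.dropLast_concat, ih, pvKeep_stop _ _ _ _ (by omega)]
      have hle : pvKeep p0.length 1 rs ≤ (p0 :: rs).length := by
        have := pvKeep_le rs p0.length 1
        simp; omega
      rw [List.take_append_of_le_length hle]

-- pieces of splitOn on '-' never contain '-'
theorem pvGoNoDash (fuel : Nat) (l cur : List Char) (acc : List (List Char))
    (hf : l.length < fuel) (hc : '-' ∉ cur) (ha : ∀ p ∈ acc, '-' ∉ p) :
    ∀ p ∈ PySem.Chars.splitOn.go ['-'] fuel l cur acc, '-' ∉ p := by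
  induction fuel generalizing l cur acc with
  | zero => omega
  | succ f ih =>
    cases l with
    | nil =>
      intro p hp
      rw [PySem.Chars.splitOn.go] at hp
      · simp only [List.mem_reverse, List.mem_cons] at hp
        rcases hp with h | h
        · subst h; simpa using hc
        · exact ha p h
      · intro h; omega
    | cons c rest =>
      intro p hp
      rw [PySem.Chars.splitOn.go] at hp
      by_cases hpre : List.isPrefixOf ['-'] (c :: rest) = true
      · rw [if_pos hpre] at hp
        have hrl : (List.drop (['-'] : List Char).length (c :: rest)).length < f := by
          simp at hf ⊢; omega
        refine ih _ _ _ hrl (by simp) ?_ p hp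
        intro q hq
        rcases List.mem_cons.mp hq with h | h
        · subst h; simpa using hc
        · exact ha q h
      · rw [if_neg hpre] at hp
        have hcne : c ≠ '-' := by
          intro h; subst h
          simp [List.isPrefixOf] at hpre
        refine ih rest (c :: cur) acc (by simp at hf ⊢; omega) ?_ ha p hp
        intro h
        rcases List.mem_cons.mp h with h | h
        · exact hcne h.symm
        · exact hc h

theorem pvSplitNoDash (s : List Char) : ∀ p ∈ PySem.Chars.splitOn s ['-'], '-' ∉ p := by
  rw [PySem.Chars.splitOn]
  exact pvGoNoDash (s.length + 1) s [] [] (by omega) (by simp) (by simp)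

theorem pvRstripDash_noop (cs : List Char) (h : '-' ∉ cs) : pvRstripDash cs = cs := by
  unfold pvRstripDash
  have hdw : cs.reverse.dropWhile (fun c => c == '-') = cs.reverse := by
    cases hr : cs.reverse with
    | nil => rfl
    | cons c t =>
      rw [List.dropWhile_cons]
      have hc : c ∈ cs := by
        have : c ∈ cs.reverse := by rw [hr]; simp
        simpa using this
      rw [if_neg (by simp; intro hEq; exact h (hEq ▸ hc))]
  rw [hdw, List.reverse_reverse]

-- the two loop bodies agree: empty parts list
theorem pvMain_nil :
    String.ofList (if (PySem.Chars.join ['-'] (pvWhilePop [])).length > 40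
       then pvRstripDash ((PySem.Chars.join ['-'] (pvWhilePop [])).take 40)
       else PySem.Chars.join ['-'] (pvWhilePop [])) = "" := by
  rw [pvWhilePop]
  simp [PySem.Chars.join_nil]

-- the two bodies agree on a non-empty list of parts whose head is '-'-free
theorem pvMain_cons (p0 : List Char) (rest : List (List Char)) (hdash : '-' ∉ p0) :
    String.ofList (if (PySem.Chars.join ['-'] (pvWhilePop (p0 :: rest))).length > 40
       then pvRstripDash ((PySem.Chars.join ['-'] (pvWhilePop (p0 :: rest))).take 40)
       else PySem.Chars.join ['-'] (pvWhilePop (p0 :: rest))) =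
    String.ofList ((PySem.Chars.join ['-'] ((p0 :: rest).take (pvKeep p0.length 1 rest))).take 40) := by
  rw [pvLoop_eq_take]
  have hok := pvKeep_ok rest p0.length 1
  have hm1 := pvKeep_ge rest p0.length 1
  generalize hm : pvKeep p0.length 1 rest = m at *
  obtain ⟨k, rfl⟩ : ∃ k, m = k + 1 := ⟨m - 1, by omega⟩
  rw [List.take_succ_cons, pvJoinLen]
  by_cases h40 : p0.length + pvCosts (rest.take k) ≤ 40
  · rw [if_neg (by omega)]
    have ht : (PySem.Chars.join ['-'] (p0 :: rest.take k)).take 40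
        = PySem.Chars.join ['-'] (p0 :: rest.take k) :=
      List.take_of_length_le (by rw [pvJoinLen]; omega)
    rw [ht]
  · rw [if_pos (by omega)]
    have hk0 : k = 0 := by
      rcases hok with h | h
      · omega
      · simp only [Nat.add_sub_cancel] at h
        omega
    subst hk0
    simp only [List.take_zero]
    rw [PySem.Chars.join_singleton]
    rw [pvRstripDash_noop _ (fun hmem => hdash (List.mem_of_mem_take hmem))]

-- ===== VERDICT (by name: the statement is the Claim_ definition above) =====
theorem truncate_suffix_py_spec : Claim_equal_truncate_suffix_py := by
  intro suffix _
  show truncate_suffix_py suffix = truncate_suffix_py_alt suffix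
  simp only [truncate_suffix_py, truncate_suffix_py_alt]
  cases hF : (PySem.Chars.splitOn suffix.toList ['-']).filter (fun p => p ≠ []) with
  | nil => exact pvMain_nil
  | cons p0 rest =>
    have hmem : p0 ∈ (PySem.Chars.splitOn suffix.toList ['-']).filter (fun p => p ≠ []) := by
      rw [hF]; simp
    exact pvMain_cons p0 rest
      (pvSplitNoDash suffix.toList p0 (List.mem_of_mem_filter hmem))
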